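-- pv_equiv track=rewrite | github.com/TomLouarn/Ichimoku_based_strategies | Exos/Vacation Planning.py | max_days_slow
-- ===== SOURCE A (Python) =====
-- import math
--
-- cities = [
--     {"city": "Paris",  "flight": 200, "hotel": 20, "car": 200},
--     {"city": "London", "flight": 250, "hotel": 30, "car": 120},
--     {"city": "Dubai",  "flight": 370, "hotel": 15, "car": 80},
--     {"city": "Mumbai", "flight": 450, "hotel": 10, "car": 70},
-- ]
--
-- def final_price(city_row: dict, duration: int) -> float:
--     """
--     Calcule le coût total pour une ville donnée et une durée donnée.
--     """
--     flight = city_row["flight"]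
--     hotel  = city_row["hotel"] * duration
--     car    = city_row["car"] * math.ceil(duration / 7)  # semaine commencée
--     return flight + hotel + car
--
-- def max_days_slow(budget: int):
--     """
--     Pour un budget donné, calcule le nombre maximum de jours abordables
--     dans chaque ville, à l’aide d’une simple boucle `while`.
--     """
--     results = []
--
--     for row in cities:
--         d = 0
--         # On augmente d tant que le prix reste <= budget
--         while final_price(row, d) <= budget:
--             d += 1
--         # d dépasse la limite → on prend d-1
--         results.append((row["city"], max(0, d - 1)))
--
--     # Extraction des séjours les plus longs et plus courts
--     max_d = max(results, key=lambda x: x[1])[1]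
--     min_d = min(results, key=lambda x: x[1])[1]
--     longest  = [r for r in results if r[1] == max_d]
--     shortest = [r for r in results if r[1] == min_d]
--
--     return results, longest, shortest
-- ===== SOURCE B (Python) =====
-- cities = [
--     {"city": "Paris",  "flight": 200, "hotel": 20, "car": 200},
--     {"city": "London", "flight": 250, "hotel": 30, "car": 120},
--     {"city": "Dubai",  "flight": 370, "hotel": 15, "car": 80},
--     {"city": "Mumbai", "flight": 450, "hotel": 10, "car": 70},
-- ]
--
-- def max_days_slow(budget: int):
--     results = []
--     for row in cities:
--         f, h, c = row["flight"], row["hotel"], row["car"]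
--         def cost(d):
--             # integer ceil(d/7); exact for d >= 0
--             return f + h * d + c * ((d + 6) // 7)
--         if cost(0) > budget:
--             results.append((row["city"], 0))
--             continue
--         # invariant: cost(lo) <= budget < cost(hi)
--         lo, hi = 0, (budget - f) // h + 1
--         while hi - lo > 1:
--             mid = (lo + hi) // 2
--             if cost(mid) <= budget:
--                 lo = mid
--             else:
--                 hi = mid
--         results.append((row["city"], lo))
--
--     max_d = max(d for _, d in results)
--     min_d = min(d for _, d in results)
--     longest  = [r for r in results if r[1] == max_d]
--     shortest = [r for r in results if r[1] == min_d]
--     return results, longest, shortest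
-- ===== Notes on version B (the rewrite author's own statement) =====
-- stated objective: faster
-- what changed: Per city, the day-by-day while-loop (increment the duration until the price exceeds the budget) is replaced by a binary search for the last affordable day count between zero and a closed-form upper bound (budget minus flight, floor-divided by the hotel rate, plus one), using the monotonicity of the cost in the duration.
import Mathlib
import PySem

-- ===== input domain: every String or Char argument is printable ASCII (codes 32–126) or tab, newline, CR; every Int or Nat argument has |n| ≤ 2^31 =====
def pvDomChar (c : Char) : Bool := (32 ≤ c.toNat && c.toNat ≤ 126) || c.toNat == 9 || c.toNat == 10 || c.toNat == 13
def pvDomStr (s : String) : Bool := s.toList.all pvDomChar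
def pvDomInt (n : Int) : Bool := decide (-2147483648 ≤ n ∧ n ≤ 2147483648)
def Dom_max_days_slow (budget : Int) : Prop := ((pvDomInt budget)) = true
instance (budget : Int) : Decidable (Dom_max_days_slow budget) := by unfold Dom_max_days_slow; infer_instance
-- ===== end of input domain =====

-- B replaces A's day-by-day while-loop per city with a binary search between 0 and a
-- closed-form upper bound (objective: faster, O(log budget) instead of O(budget) per city).
-- The module constant `cities` (shared by both Pythons):
def pvCities : List (String × Int × Int × Int) :=
  [("Paris", 200, 20, 200), ("London", 250, 30, 120),
   ("Dubai", 370, 15, 80), ("Mumbai", 450, 10, 70)]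

-- ===== PORT A =====
-- final_price: math.ceil(duration/7) ported as the integer ceiling (d+6)/7
-- (Lean's Int `/` by the positive literal 7 is the floor; exact for every duration the
-- program reaches — d ≥ 0 and far below any float-rounding range).
def pvFinalPrice (f ht cr d : Int) : Int := f + ht * d + cr * ((d + 6) / 7)

-- A's `while final_price(row, d) <= budget: d += 1`.  The first guard is a totality
-- guard only (never taken for the module's cities, whose hotel > 0 and car ≥ 0).
def pvLoopA (f ht cr budget d : Int) : Int :=
  if ht ≤ 0 ∨ cr < 0 then d
  else if pvFinalPrice f ht cr d ≤ budget then pvLoopA f ht cr budget (d + 1) else d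
termination_by (budget + 1 - pvFinalPrice f ht cr d).toNat
decreasing_by
  rename_i hg hle
  have h7 : (d + 6) / 7 ≤ (d + 1 + 6) / 7 := by omega
  have hcr : 0 ≤ cr * ((d + 1 + 6) / 7) - cr * ((d + 6) / 7) := by
    have := mul_le_mul_of_nonneg_left h7 (by omega : (0:Int) ≤ cr)
    omega
  have hm : ht * (d + 1) = ht * d + ht := by ring
  simp only [pvFinalPrice] at *
  omega

def max_days_slow (budget : Int) : List (List (String × Int)) :=
  let results := pvCities.map (fun r => (r.1, max 0 (pvLoopA r.2.1 r.2.2.1 r.2.2.2 budget 0 - 1)))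
  -- max(results, key=lambda x: x[1])[1]; results is never empty, the default is unreachable
  let max_d := ((PySem.List.max? results (fun x => x.2)).getD ("", 0)).2
  let min_d := ((PySem.List.min? results (fun x => x.2)).getD ("", 0)).2
  let longest := results.filter (fun r => r.2 == max_d)
  let shortest := results.filter (fun r => r.2 == min_d)
  [results, longest, shortest]

-- ===== PORT B =====
def pvCost (f ht cr d : Int) : Int := f + ht * d + cr * ((d + 6) / 7)

-- binary search keeping the invariant cost(lo) ≤ budget < cost(hi)
def pvBisect (f ht cr budget lo hi : Int) : Int :=
  if 1 < hi - lo then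
    let mid := (lo + hi) / 2
    if pvCost f ht cr mid ≤ budget then pvBisect f ht cr budget mid hi
    else pvBisect f ht cr budget lo mid
  else lo
termination_by (hi - lo).toNat
decreasing_by all_goals omega

def pvCityDays (budget f ht cr : Int) : Int :=
  if budget < pvCost f ht cr 0 then 0
  else pvBisect f ht cr budget 0 (PySem.Int.floordiv (budget - f) ht + 1)

def max_days_slow_alt (budget : Int) : List (List (String × Int)) :=
  let results := pvCities.map (fun r => (r.1, pvCityDays budget r.2.1 r.2.2.1 r.2.2.2))
  let max_d := ((PySem.List.max? results (fun x => x.2)).getD ("", 0)).2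
  let min_d := ((PySem.List.min? results (fun x => x.2)).getD ("", 0)).2
  let longest := results.filter (fun r => r.2 == max_d)
  let shortest := results.filter (fun r => r.2 == min_d)
  [results, longest, shortest]

-- ===== PRECONDITION & SPEC =====
def Spec_max_days_slow (budget : Int) (out : List (List (String × Int))) : Prop := out = max_days_slow_alt budget
instance (budget : Int) (out : List (List (String × Int))) : Decidable (Spec_max_days_slow budget out) := by unfold Spec_max_days_slow; infer_instance

-- ===== CLAIM (what is proved, stated in full; the proofs are below) =====
def Claim_equal_max_days_slow : Prop := ∀ (budget : Int), Dom_max_days_slow budget → Spec_max_days_slow budget (max_days_slow budget)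

-- ===== LEMMAS AND PROOFS =====

theorem pvCost_mono (f ht cr : Int) (hh : 1 ≤ ht) (hc : 0 ≤ cr) {d e : Int} (hde : d ≤ e) :
    pvCost f ht cr d ≤ pvCost f ht cr e := by
  have h7 : (d + 6) / 7 ≤ (e + 6) / 7 := by omega
  have h1 := mul_le_mul_of_nonneg_left h7 hc
  have h2 := mul_le_mul_of_nonneg_left hde (by omega : (0:Int) ≤ ht)
  simp only [pvCost]; omega

theorem pvLoopA_spec (f ht cr budget : Int) (hh : 1 ≤ ht) (hc : 0 ≤ cr) (d : Int) :
    d ≤ pvLoopA f ht cr budget d ∧ budget < pvFinalPrice f ht cr (pvLoopA f ht cr budget d) ∧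
      ∀ e, d ≤ e → e < pvLoopA f ht cr budget d → pvFinalPrice f ht cr e ≤ budget := by
  fun_induction pvLoopA f ht cr budget d with
  | case1 d hg => exact absurd hg (by omega)
  | case2 d hg hle ih =>
    rcases ih with ⟨ih1, ih2, ih3⟩
    refine ⟨by omega, ih2, ?_⟩
    intro e he1 he2
    rcases eq_or_lt_of_le he1 with rfl | hlt
    · exact hle
    · exact ih3 e (by omega) he2
  | case3 d hg hgt => exact ⟨le_refl _, by omega, by omega⟩

theorem pvBisect_spec (f ht cr budget : Int) :
    ∀ lo hi : Int, 0 ≤ lo → pvCost f ht cr lo ≤ budget → budget < pvCost f ht cr hi → lo < hi →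
      0 ≤ pvBisect f ht cr budget lo hi ∧ pvCost f ht cr (pvBisect f ht cr budget lo hi) ≤ budget ∧
        budget < pvCost f ht cr (pvBisect f ht cr budget lo hi + 1) := by
  intro lo hi
  fun_induction pvBisect f ht cr budget lo hi with
  | case1 lo hi hgt mid hle ih =>
    intro h0 _ hbad _
    exact ih (by omega) hle hbad (by omega)
  | case2 lo hi hgt mid hgt2 ih =>
    intro h0 hgood _ _
    exact ih h0 hgood (by omega) (by omega)
  | case3 lo hi hng =>
    intro h0 hgood hbad hlt
    have : hi = lo + 1 := by omega
    subst this
    exact ⟨h0, hgood, hbad⟩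

theorem pvCityDays_eq (budget f ht cr : Int) (hh : 1 ≤ ht) (hc : 0 ≤ cr) :
    max 0 (pvLoopA f ht cr budget 0 - 1) = pvCityDays budget f ht cr := by
  have hcost0 : pvCost f ht cr 0 = f := by norm_num [pvCost]
  have hsame : ∀ d, pvFinalPrice f ht cr d = pvCost f ht cr d := fun d => rfl
  unfold pvCityDays
  split_ifs with hb
  · -- budget < f: loop stops immediately
    rw [pvLoopA]
    simp only [hsame, hcost0] at *
    rw [if_neg (by omega), if_neg (by omega)]
    omega
  · -- f ≤ budget
    rw [not_lt] at hb
    obtain ⟨hL1, hL2, hL3⟩ := pvLoopA_spec f ht cr budget hh hc 0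
    set L := pvLoopA f ht cr budget 0 with hLdef
    have hLpos : 1 ≤ L := by
      by_contra hcon
      have : L = 0 := by omega
      rw [this, hsame, hcost0] at hL2; omega
    -- upper bound for bisect
    set hi0 : Int := PySem.Int.floordiv (budget - f) ht + 1 with hhi
    have hfd : PySem.Int.floordiv (budget - f) ht = (budget - f) / ht :=
      PySem.Int.floordiv_eq_ediv_of_pos (by omega)
    have hq0 : 0 ≤ (budget - f) / ht := Int.ediv_nonneg (by omega) (by omega)
    have key : ∀ q : Int, 0 ≤ q → budget - f < ht * (q + 1) → budget < pvCost f ht cr (q + 1) := by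
      intro q hq hup
      have hdiv7 : 1 ≤ (q + 1 + 6) / 7 := by omega
      have hcr7 : 0 ≤ cr * ((q + 1 + 6) / 7) := mul_nonneg hc (by omega)
      simp only [pvCost]
      omega
    have hbad : budget < pvCost f ht cr hi0 := by
      rw [hhi, hfd]
      refine key _ hq0 ?_
      have hdm := Int.emod_add_mul_ediv (budget - f) ht
      have hr0 := Int.emod_nonneg (budget - f) (by omega : ht ≠ 0)
      have hr1 := Int.emod_lt_of_pos (budget - f) (by omega : 0 < ht)
      have hmul : ht * ((budget - f) / ht + 1) = ht * ((budget - f) / ht) + ht := by ring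
      omega
    obtain ⟨hr2, hr3, hr4⟩ := pvBisect_spec f ht cr budget 0 hi0
      (le_refl 0) (by omega) hbad (by omega)
    set r := pvBisect f ht cr budget 0 hi0 with hrdef
    have ha1 : pvCost f ht cr (L - 1) ≤ budget := by
      rw [← hsame]; exact hL3 (L - 1) (by omega) (by omega)
    have ha2 : budget < pvCost f ht cr L := by rw [← hsame]; exact hL2
    have heq : L - 1 = r := by
      rcases lt_trichotomy (L - 1) r with hlt | heq | hgt
      · have := pvCost_mono f ht cr hh hc (show L ≤ r by omega)
        omega
      · exact heq
      · have := pvCost_mono f ht cr hh hc (show r + 1 ≤ L - 1 by omega)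
        omega
    omega

theorem max_days_slow_eq (budget : Int) : max_days_slow budget = max_days_slow_alt budget := by
  have h := fun f ht cr hh hc => pvCityDays_eq budget f ht cr hh hc
  have hres : pvCities.map (fun r => (r.1, max 0 (pvLoopA r.2.1 r.2.2.1 r.2.2.2 budget 0 - 1)))
      = pvCities.map (fun r => (r.1, pvCityDays budget r.2.1 r.2.2.1 r.2.2.2)) := by
    simp only [pvCities, List.map]
    rw [h 200 20 200 (by norm_num) (by norm_num), h 250 30 120 (by norm_num) (by norm_num),
        h 370 15 80 (by norm_num) (by norm_num), h 450 10 70 (by norm_num) (by norm_num)]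
  simp only [max_days_slow, max_days_slow_alt, hres]

-- ===== VERDICT (by name: the statement is the Claim_ definition above) =====
theorem max_days_slow_spec : Claim_equal_max_days_slow := by
  intro budget _
  unfold Spec_max_days_slow
  exact max_days_slow_eq budget
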